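-- pv_equiv track=rewrite | github.com/adityasahas/fable | fable/neighboralias.py | __detect_str_alnum
-- ===== SOURCE A (Python) =====
-- def __detect_str_alnum(string):
--     """Detect whether string has alpha and/or numeric char"""
--     typee = ''
--     alpha_char = [c for c in string if c.isalpha()]
--     num_char = [c for c in string if c.isdigit()]
--     if len(alpha_char) > 0:
--         typee += 'A'
--     if len(num_char) > 0:
--         typee += 'N'
--     return typee
-- ===== SOURCE B (Python) =====
-- def __detect_str_alnum(string):
--     """Detect whether string has alpha and/or numeric char"""
--     has_alpha = False
--     has_num = False
--     for c in string:
--         if c.isalpha():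
--             has_alpha = True
--         if c.isdigit():
--             has_num = True
--         if has_alpha and has_num:
--             break
--     return ('A' if has_alpha else '') + ('N' if has_num else '')
-- ===== Notes on version B (the rewrite author's own statement) =====
-- stated objective: simpler
-- what changed: Replaces the two full filter passes that build throwaway character lists with a single flag-maintaining scan that stops early once both an alphabetic and a digit character have been seen.
import Mathlib
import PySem

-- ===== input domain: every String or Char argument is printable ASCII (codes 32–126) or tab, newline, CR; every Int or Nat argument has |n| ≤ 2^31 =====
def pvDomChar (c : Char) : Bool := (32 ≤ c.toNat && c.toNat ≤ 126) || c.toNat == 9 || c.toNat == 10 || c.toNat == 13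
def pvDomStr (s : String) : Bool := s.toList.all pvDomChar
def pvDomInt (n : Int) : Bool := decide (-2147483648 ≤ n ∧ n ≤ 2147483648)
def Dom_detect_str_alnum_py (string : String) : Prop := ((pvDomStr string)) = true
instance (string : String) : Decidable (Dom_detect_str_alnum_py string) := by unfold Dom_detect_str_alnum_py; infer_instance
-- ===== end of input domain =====

-- B replaces A's two filter passes with one flag-maintaining scan with early exit (objective: simpler).

-- ===== PORT A =====
def detect_str_alnum_py (string : String) : String :=
  let typee := ""
  let alpha_char := string.toList.filter (fun c => PySem.Chars.isalpha c)
  let num_char := string.toList.filter (fun c => PySem.Chars.isdigit c)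
  let typee := if alpha_char.length > 0 then typee ++ "A" else typee
  let typee := if num_char.length > 0 then typee ++ "N" else typee
  typee

-- ===== PORT B =====
-- the for-loop of Source B: two flags, break once both are set
def detectFlags : List Char → Bool → Bool → Bool × Bool
  | [], ha, hn => (ha, hn)
  | c :: cs, ha, hn =>
    let ha := ha || PySem.Chars.isalpha c
    let hn := hn || PySem.Chars.isdigit c
    if ha && hn then (ha, hn) else detectFlags cs ha hn

def detect_str_alnum_py_alt (string : String) : String :=
  let (ha, hn) := detectFlags string.toList false false
  (if ha then "A" else "") ++ (if hn then "N" else "")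

-- ===== PRECONDITION & SPEC =====
def Spec_detect_str_alnum_py (string : String) (out : String) : Prop := out = detect_str_alnum_py_alt string
instance (string : String) (out : String) : Decidable (Spec_detect_str_alnum_py string out) := by unfold Spec_detect_str_alnum_py; infer_instance

-- ===== CLAIM (what is proved, stated in full; the proofs are below) =====
def Claim_equal_detect_str_alnum_py : Prop := ∀ (string : String), Dom_detect_str_alnum_py string → Spec_detect_str_alnum_py string (detect_str_alnum_py string)

-- ===== LEMMAS AND PROOFS =====

theorem detectFlags_eq (cs : List Char) : ∀ (ha hn : Bool),
    detectFlags cs ha hn =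
      (ha || cs.any (fun c => PySem.Chars.isalpha c), hn || cs.any (fun c => PySem.Chars.isdigit c)) := by
  induction cs with
  | nil => intro ha hn; simp [detectFlags]
  | cons c cs ih =>
    intro ha hn
    simp only [detectFlags, List.any_cons]
    split_ifs with h
    · rw [Bool.and_eq_true] at h
      obtain ⟨h1, h2⟩ := h
      rw [Bool.or_eq_true] at h1 h2
      rcases h1 with h1 | h1 <;> rcases h2 with h2 | h2 <;> simp [h1, h2]
    · rw [ih]; simp [Bool.or_assoc]

theorem filter_len_pos_iff_any (cs : List Char) (p : Char → Bool) :
    (cs.filter p).length > 0 ↔ cs.any p = true := by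
  simp [List.length_pos_iff, List.any_eq_true, List.filter_eq_nil_iff]

-- ===== VERDICT (by name: the statement is the Claim_ definition above) =====
theorem detect_str_alnum_py_spec : Claim_equal_detect_str_alnum_py := by
  intro s _
  unfold Spec_detect_str_alnum_py detect_str_alnum_py detect_str_alnum_py_alt
  rw [detectFlags_eq]
  simp only [Bool.false_or]
  simp only [filter_len_pos_iff_any]
  by_cases hA : s.toList.any (fun c => PySem.Chars.isalpha c) = true <;>
    by_cases hN : s.toList.any (fun c => PySem.Chars.isdigit c) = true <;>
      simp [hA, hN]
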